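-- pv_equiv track=rewrite | github.com/IoDeSer/python-library | IoDeSer/_DeSer/_IoDes.py | __substring_brackets
-- ===== SOURCE A (Python) =====
-- def __substring_brackets(ioString):
--     firstIndex = -1
--     lastIndex = -1
--     for i in range(len(ioString)):
--         if ioString[i] == '|':
--             firstIndex = i + 1
--             break
--     for i in range(len(ioString)):
--         if ioString[len(ioString) - 1 - i] == '|':
--             lastIndex = len(ioString) - 1 - i
--             break
--     ioString = ioString[firstIndex:lastIndex]
--     return ioString
-- ===== SOURCE B (Python) =====
-- def __substring_brackets(ioString):
--     parts = ioString.split('|')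
--     return '|'.join(parts[1:-1])
-- ===== Notes on version B (the rewrite author's own statement) =====
-- stated objective: idiomatic
-- what changed: Replaces A's two hand-written index-scanning loops (forward for the first pipe, backward for the last pipe) plus a slice by the idiomatic one-liner joining the interior segments of split('|') back together.
import Mathlib
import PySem

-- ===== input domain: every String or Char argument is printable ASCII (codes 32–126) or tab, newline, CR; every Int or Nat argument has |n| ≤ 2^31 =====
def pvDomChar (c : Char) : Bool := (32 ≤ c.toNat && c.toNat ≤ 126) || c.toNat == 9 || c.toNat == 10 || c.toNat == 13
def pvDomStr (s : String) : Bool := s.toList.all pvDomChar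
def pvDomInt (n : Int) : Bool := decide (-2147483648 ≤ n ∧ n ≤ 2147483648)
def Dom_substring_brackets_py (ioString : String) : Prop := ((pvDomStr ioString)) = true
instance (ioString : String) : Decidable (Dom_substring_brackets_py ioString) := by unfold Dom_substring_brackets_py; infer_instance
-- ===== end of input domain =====

-- B replaces A's two index-scanning loops + slice by split('|') / join of the interior parts (idiomatic one-liner).

-- ===== PORT A =====
-- first loop: for i in range(len(s)): if s[i] == '|': firstIndex = i + 1; break
-- (walks the characters left to right carrying the running index i; -1 if no '|')
def pvFindFirstA : List Char → Int → Int
  | [], _ => -1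
  | c :: t, i => if c = '|' then i + 1 else pvFindFirstA t (i + 1)

-- second loop: for i in range(len(s)): if s[len(s)-1-i] == '|': lastIndex = len(s)-1-i; break
-- (visits the characters right to left, i.e. s.reverse, carrying the index len-1-i; -1 if no '|')
def pvFindLastA : List Char → Int → Int
  | [], _ => -1
  | c :: t, idx => if c = '|' then idx else pvFindLastA t (idx - 1)

def substring_brackets_py (ioString : String) : String :=
  let firstIndex := pvFindFirstA ioString.toList 0
  let lastIndex := pvFindLastA ioString.toList.reverse ((ioString.toList.length : Int) - 1)
  PySem.Str.slice ioString (some firstIndex) (some lastIndex)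

-- ===== PORT B =====
def substring_brackets_py_alt (ioString : String) : String :=
  let parts := PySem.Chars.splitOn ioString.toList ['|']
  String.ofList (PySem.Chars.join ['|'] (PySem.List.slice parts (some 1) (some (-1))))

-- ===== PRECONDITION & SPEC =====
def Spec_substring_brackets_py (ioString : String) (out : String) : Prop := out = substring_brackets_py_alt ioString
instance (ioString : String) (out : String) : Decidable (Spec_substring_brackets_py ioString out) := by unfold Spec_substring_brackets_py; infer_instance

-- ===== CLAIM (what is proved, stated in full; the proofs are below) =====
def Claim_equal_substring_brackets_py : Prop := ∀ (ioString : String), Dom_substring_brackets_py ioString → Spec_substring_brackets_py ioString (substring_brackets_py ioString)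

-- ===== LEMMAS AND PROOFS =====

-- recursive characterisation of str.split('|') : first piece × remaining pieces
def pvSplitC : List Char → List Char × List (List Char)
  | [] => ([], [])
  | c :: t =>
    let r := pvSplitC t
    if c = '|' then ([], r.1 :: r.2) else (c :: r.1, r.2)

theorem pv_go_inv (fuel : Nat) : ∀ (l cur : List Char) (acc : List (List Char)), l.length ≤ fuel →
    PySem.Chars.splitOn.go ['|'] fuel l cur acc =
      acc.reverse ++ (cur.reverse ++ (pvSplitC l).1) :: (pvSplitC l).2 := by
  induction fuel with
  | zero =>
    intro l cur acc h
    have : l = [] := List.eq_nil_of_length_eq_zero (Nat.le_zero.mp h)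
    subst this
    simp [PySem.Chars.splitOn.go, pvSplitC]
  | succ f ih =>
    intro l cur acc h
    cases l with
    | nil => simp [PySem.Chars.splitOn.go, pvSplitC]
    | cons c rest =>
      rw [PySem.Chars.splitOn.go]
      by_cases hc : c = '|'
      · subst hc
        simp only [List.isPrefixOf, BEq.rfl, Bool.true_and, if_true,
          List.length_singleton, List.drop_succ_cons, List.drop_zero]
        rw [ih rest [] _ (by simpa using Nat.lt_succ_iff.mp (by simpa using h))]
        simp [pvSplitC]
      · have hpre : List.isPrefixOf ['|'] (c :: rest) = false := by
          simp [List.isPrefixOf]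
          exact fun hh => (hc hh.symm).elim
        simp only [hpre]
        rw [ih rest (c :: cur) acc (by simpa using Nat.lt_succ_iff.mp (by simpa using h))]
        simp [pvSplitC, hc]

theorem pv_splitOn_eq (l : List Char) :
    PySem.Chars.splitOn l ['|'] = (pvSplitC l).1 :: (pvSplitC l).2 := by
  have := pv_go_inv (l.length + 1) l [] [] (by omega)
  simpa [PySem.Chars.splitOn] using this

theorem pv_splitc_no_pipe (l : List Char) (h : '|' ∉ l) : pvSplitC l = (l, []) := by
  induction l with
  | nil => rfl
  | cons c t ih =>
    have hc : c ≠ '|' := fun hh => h (hh ▸ List.mem_cons_self ..)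
    simp [pvSplitC, hc, ih (fun hm => h (List.mem_cons_of_mem _ hm))]

theorem pv_splitc_first (p q : List Char) (hp : '|' ∉ p) :
    pvSplitC (p ++ '|' :: q) = (p, (pvSplitC q).1 :: (pvSplitC q).2) := by
  induction p with
  | nil => simp [pvSplitC]
  | cons c t ih =>
    have hc : c ≠ '|' := fun hh => hp (hh ▸ List.mem_cons_self ..)
    simp [pvSplitC, hc, ih (fun hm => hp (List.mem_cons_of_mem _ hm))]

theorem pv_splitc_last (m sfx : List Char) (hs : '|' ∉ sfx) :
    pvSplitC (m ++ '|' :: sfx) = ((pvSplitC m).1, (pvSplitC m).2 ++ [sfx]) := by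
  induction m with
  | nil => simp [pvSplitC, pv_splitc_no_pipe sfx hs]
  | cons c t ih =>
    by_cases hc : c = '|' <;> simp [pvSplitC, hc, ih]

-- '|'.join of all the pieces of split('|') restores the string
theorem pv_join_splitc (l : List Char) :
    PySem.Chars.join ['|'] ((pvSplitC l).1 :: (pvSplitC l).2) = l := by
  induction l with
  | nil => simp [pvSplitC, PySem.Chars.join_singleton]
  | cons c t ih =>
    by_cases hc : c = '|'
    · subst hc
      simp only [pvSplitC, if_true]
      rw [PySem.Chars.join_cons_cons]
      simpa using ih
    · simp only [pvSplitC, hc, if_false]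
      cases h2 : (pvSplitC t).2 with
      | nil =>
        rw [h2] at ih
        simp [PySem.Chars.join_singleton] at ih ⊢
        exact ih
      | cons a b =>
        rw [h2] at ih
        rw [PySem.Chars.join_cons_cons] at ih ⊢
        simpa using ih

theorem pv_ff_none (l : List Char) (i : Int) (h : '|' ∉ l) : pvFindFirstA l i = -1 := by
  induction l generalizing i with
  | nil => rfl
  | cons c t ih =>
    have hc : c ≠ '|' := fun hh => h (hh ▸ List.mem_cons_self ..)
    simp [pvFindFirstA, hc, ih _ (fun hm => h (List.mem_cons_of_mem _ hm))]

theorem pv_ff_pos (p q : List Char) (i : Int) (hp : '|' ∉ p) :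
    pvFindFirstA (p ++ '|' :: q) i = i + p.length + 1 := by
  induction p generalizing i with
  | nil => simp [pvFindFirstA]
  | cons c t ih =>
    have hc : c ≠ '|' := fun hh => hp (hh ▸ List.mem_cons_self ..)
    rw [List.cons_append]
    simp only [pvFindFirstA, hc, if_false]
    rw [ih _ (fun hm => hp (List.mem_cons_of_mem _ hm))]
    simp only [List.length_cons]
    push_cast
    ring

theorem pv_fl_none (l : List Char) (i : Int) (h : '|' ∉ l) : pvFindLastA l i = -1 := by
  induction l generalizing i with
  | nil => rfl
  | cons c t ih =>
    have hc : c ≠ '|' := fun hh => h (hh ▸ List.mem_cons_self ..)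
    simp [pvFindLastA, hc, ih _ (fun hm => h (List.mem_cons_of_mem _ hm))]

theorem pv_fl_pos (s r : List Char) (i : Int) (hs : '|' ∉ s) :
    pvFindLastA (s ++ '|' :: r) i = i - s.length := by
  induction s generalizing i with
  | nil => simp [pvFindLastA]
  | cons c t ih =>
    have hc : c ≠ '|' := fun hh => hs (hh ▸ List.mem_cons_self ..)
    rw [List.cons_append]
    simp only [pvFindLastA, hc, if_false]
    rw [ih _ (fun hm => hs (List.mem_cons_of_mem _ hm))]
    simp only [List.length_cons]
    push_cast
    ring

theorem pv_exists_first {α : Type} [DecidableEq α] {a : α} {l : List α} (h : a ∈ l) :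
    ∃ p q, l = p ++ a :: q ∧ a ∉ p := by
  induction l with
  | nil => cases h
  | cons c t ih =>
    by_cases hc : c = a
    · exact ⟨[], t, by rw [hc]; rfl, by simp⟩
    · obtain ⟨p, q, hl, hp⟩ := ih (by cases h with
        | head => exact absurd rfl hc
        | tail _ hm => exact hm)
      exact ⟨c :: p, q, by rw [hl]; rfl, by
        simp only [List.mem_cons, not_or]
        exact ⟨fun hh => hc hh.symm, hp⟩⟩

theorem pv_exists_last {α : Type} [DecidableEq α] {a : α} {l : List α} (h : a ∈ l) :
    ∃ p q, l = p ++ a :: q ∧ a ∉ q := by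
  obtain ⟨p, q, hl, hp⟩ := pv_exists_first (l := l.reverse) (by simpa using h)
  refine ⟨q.reverse, p.reverse, ?_, by simpa using hp⟩
  have := congrArg List.reverse hl
  simpa using this

theorem pv_slice_same {α : Type} (xs : List α) (a : Int) :
    PySem.List.slice xs (some a) (some a) = [] := by
  apply List.eq_nil_of_length_eq_zero
  rw [PySem.List.length_slice]
  omega

theorem pv_slice_one_negone {α : Type} (xs : List α) :
    PySem.List.slice xs (some 1) (some (-1)) = xs.tail.dropLast := by
  simp [pysem, PySem.List.slice, PySem.List.clampIdx]
  cases xs with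
  | nil => simp
  | cons x t =>
    rw [if_neg (by simp)]
    have h1 : ((↑(x :: t).length : Int) + -1).toNat = t.length := by simp
    have h2 : min 1 (x :: t).length = 1 := by simp
    rw [h1, h2, List.drop_one, List.tail_cons, List.dropLast_eq_take]

-- ===== VERDICT (by name: the statement is the Claim_ definition above) =====
theorem substring_brackets_py_spec : Claim_equal_substring_brackets_py := by
  intro s _
  unfold Spec_substring_brackets_py substring_brackets_py substring_brackets_py_alt
  simp only [PySem.Str.slice, PySem.Chars.slice_eq_listSlice]
  apply congrArg String.ofList
  rw [pv_splitOn_eq, pv_slice_one_negone, List.tail_cons]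
  by_cases h : '|' ∈ s.toList
  · obtain ⟨p, q, hl, hp⟩ := pv_exists_first h
    rw [hl]
    by_cases h2 : '|' ∈ q
    · obtain ⟨m, sfx, hq, hs⟩ := pv_exists_last h2
      rw [hq]
      rw [pv_ff_pos p (m ++ '|' :: sfx) 0 hp]
      have hrev : (p ++ '|' :: (m ++ '|' :: sfx)).reverse
          = sfx.reverse ++ '|' :: (m.reverse ++ '|' :: p.reverse) := by simp
      rw [hrev, pv_fl_pos _ _ _ (by simpa using hs)]
      rw [pv_splitc_first p _ hp, pv_splitc_last m sfx hs]
      have hlen : ((p ++ '|' :: (m ++ '|' :: sfx)).length : Int) - 1 - (sfx.reverse.length : Int)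
          = ((p.length + 1 + m.length : Nat) : Int) := by
        simp only [List.length_append, List.length_cons, List.length_reverse]
        push_cast
        ring
      rw [hlen]
      have hfirst : (0 : Int) + p.length + 1 = ((p.length + 1 : Nat) : Int) := by push_cast; ring
      rw [hfirst, PySem.List.slice_natCast]
      -- A's slice is exactly m
      have hdrop : (p ++ '|' :: (m ++ '|' :: sfx)).drop (p.length + 1) = m ++ '|' :: sfx := by
        have : p ++ '|' :: (m ++ '|' :: sfx) = (p ++ ['|']) ++ (m ++ '|' :: sfx) := by simp
        rw [this]
        have hlp : (p ++ ['|']).length = p.length + 1 := by simp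
        rw [← hlp, List.drop_left]
      rw [hdrop]
      have htake : (p.length + 1 + m.length - (p.length + 1)) = m.length := by omega
      rw [htake]
      -- B's side: dropLast of (fst m :: (snd m ++ [sfx])) is the split of m; join restores m
      have hdl : ((pvSplitC m).1 :: ((pvSplitC m).2 ++ [sfx])).dropLast
          = (pvSplitC m).1 :: (pvSplitC m).2 := by
        rw [show (pvSplitC m).1 :: ((pvSplitC m).2 ++ [sfx])
            = ((pvSplitC m).1 :: (pvSplitC m).2) ++ [sfx] by simp]
        exact List.dropLast_concat ..
      rw [hdl, pv_join_splitc, List.take_left]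
    · -- exactly one '|'
      rw [pv_ff_pos p q 0 hp]
      have hrev : (p ++ '|' :: q).reverse = q.reverse ++ '|' :: p.reverse := by simp
      rw [hrev, pv_fl_pos _ _ _ (by simpa using h2)]
      rw [pv_splitc_first p q hp, pv_splitc_no_pipe q h2]
      have hlast : ((p ++ '|' :: q).length : Int) - 1 - (q.reverse.length : Int)
          = ((p.length : Nat) : Int) := by
        simp only [List.length_append, List.length_cons, List.length_reverse]
        push_cast
        ring
      rw [hlast]
      have hfirst : (0 : Int) + p.length + 1 = ((p.length + 1 : Nat) : Int) := by push_cast; ring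
      rw [hfirst, PySem.List.slice_natCast]
      have hz : p.length - (p.length + 1) = 0 := by omega
      rw [hz]
      simp [PySem.Chars.join, List.intercalate]
  · rw [pv_ff_none _ _ h, pv_fl_none _ _ (by simpa using h), pv_slice_same,
      pv_splitc_no_pipe _ h]
    simp [PySem.Chars.join, List.intercalate]
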